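-- pv_equiv track=rewrite | github.com/volonm/Graphs-Isomorphism-Solution | count_isomorphism.py | is_balanced_count_iso
-- ===== SOURCE A (Python) =====
-- def is_balanced_count_iso(coloring_1: dict, coloring_2: dict) -> bool:
--     # if len(coloring_1.keys()) != len(coloring_2.keys()):
--     #     return False
--     for key, value in coloring_1.items():
--         if key not in coloring_2:
--             return False
--         else:
--             if len(value) != len(coloring_2[key]):
--                 return False
--             # for vertex in value:
--             #     if not check_edges_bijection(vertex, coloring_2[key][0].graph):
--             #         return False
--     for key, value in coloring_2.items():
--         if key not in coloring_1:
--             return False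
--         else:
--             if len(value) != len(coloring_1[key]):
--                 return False
--             # for vertex in value:
--             #     if not check_edges_bijection(vertex, coloring_1[key][0].graph):
--             #         return False
--
--     return True
-- ===== SOURCE B (Python) =====
-- def is_balanced_count_iso(coloring_1: dict, coloring_2: dict) -> bool:
--     # Build a length-signature table for each coloring once, then compare them
--     # with a single dict equality instead of two directional scans.
--     sig_1 = {k: len(v) for k, v in coloring_1.items()}
--     sig_2 = {k: len(v) for k, v in coloring_2.items()}
--     return sig_1 == sig_2
-- ===== Notes on version B (the rewrite author's own statement) =====
-- stated objective: simpler
-- what changed: Instead of A's two directional passes that test membership and compare bucket lengths against the other dict, B builds a bucket-length signature dict for each coloring once and returns a single dict equality.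
import Mathlib
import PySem

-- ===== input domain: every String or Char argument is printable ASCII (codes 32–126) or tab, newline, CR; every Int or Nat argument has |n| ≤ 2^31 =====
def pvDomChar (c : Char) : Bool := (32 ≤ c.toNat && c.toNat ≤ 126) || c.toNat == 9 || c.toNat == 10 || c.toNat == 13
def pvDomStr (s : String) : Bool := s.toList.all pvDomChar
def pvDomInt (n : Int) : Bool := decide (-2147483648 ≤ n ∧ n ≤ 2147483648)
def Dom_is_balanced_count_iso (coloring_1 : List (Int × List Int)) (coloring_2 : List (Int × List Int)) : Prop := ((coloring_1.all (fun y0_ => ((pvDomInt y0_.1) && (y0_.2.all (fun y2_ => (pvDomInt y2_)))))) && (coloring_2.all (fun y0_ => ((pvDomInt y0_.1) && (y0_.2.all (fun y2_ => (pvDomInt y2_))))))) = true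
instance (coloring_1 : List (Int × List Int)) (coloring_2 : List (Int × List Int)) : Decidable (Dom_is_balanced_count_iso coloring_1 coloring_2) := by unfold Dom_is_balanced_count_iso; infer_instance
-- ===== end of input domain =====

-- B replaces A's two directional membership-and-length passes by building a
-- bucket-length signature dict per coloring and comparing them once (simpler).


-- ===== PORT A =====
-- one directional pass: 'for key, value in items: if key not in other: return False
--                        else: if len(value) != len(other[key]): return False'
def pvPassA (other : PySem.Dict Int (List Int)) : List (Int × List Int) → Bool
  | [] => true
  | (k, v) :: rest =>
    if !(other.contains k) then false
    else if v.length ≠ (other.getD k []).length then false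
    else pvPassA other rest

def is_balanced_count_iso (coloring_1 : List (Int × List Int)) (coloring_2 : List (Int × List Int)) : Bool :=
  let d1 := PySem.Dict.ofList coloring_1   -- the dict arguments, marshalled
  let d2 := PySem.Dict.ofList coloring_2
  pvPassA d2 d1.items && pvPassA d1 d2.items

-- ===== PORT B =====
-- {k: len(v) for k, v in d.items()}
def pvSig (d : PySem.Dict Int (List Int)) : PySem.Dict Int Int :=
  PySem.Dict.ofList (d.items.map (fun p => (p.1, (p.2.length : Int))))

-- Python's '==' on dicts (order-insensitive): same size and every entry of a found in b
def pvDictEq (a b : PySem.Dict Int Int) : Bool :=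
  a.size == b.size && a.items.all (fun p => b.get? p.1 == some p.2)

def is_balanced_count_iso_alt (coloring_1 : List (Int × List Int)) (coloring_2 : List (Int × List Int)) : Bool :=
  pvDictEq (pvSig (PySem.Dict.ofList coloring_1)) (pvSig (PySem.Dict.ofList coloring_2))

-- ===== PRECONDITION & SPEC =====
def Spec_is_balanced_count_iso (coloring_1 : List (Int × List Int)) (coloring_2 : List (Int × List Int)) (out : Bool) : Prop := out = is_balanced_count_iso_alt coloring_1 coloring_2
instance (coloring_1 : List (Int × List Int)) (coloring_2 : List (Int × List Int)) (out : Bool) : Decidable (Spec_is_balanced_count_iso coloring_1 coloring_2 out) := by unfold Spec_is_balanced_count_iso; infer_instance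

-- ===== CLAIM (what is proved, stated in full; the proofs are below) =====
def Claim_equal_is_balanced_count_iso : Prop := ∀ (coloring_1 : List (Int × List Int)) (coloring_2 : List (Int × List Int)), Dom_is_balanced_count_iso coloring_1 coloring_2 → Spec_is_balanced_count_iso coloring_1 coloring_2 (is_balanced_count_iso coloring_1 coloring_2)

-- ===== LEMMAS AND PROOFS =====

-- A's directional pass, characterised
theorem pvPassA_iff (other : PySem.Dict Int (List Int)) (l : List (Int × List Int)) :
    pvPassA other l = true ↔
      ∀ p ∈ l, other.contains p.1 = true ∧ p.2.length = (other.getD p.1 []).length := by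
  induction l with
  | nil => simp [pvPassA]
  | cons p rest ih =>
    obtain ⟨k, v⟩ := p
    simp only [pvPassA, List.mem_cons]
    by_cases hc : other.contains k = true
    · by_cases hl : v.length = (other.getD k []).length
      · simp [hc, hl, ih]
      · simp [hc, hl]
    · simp [hc]

-- ofList of a list with distinct keys keeps the items list
theorem items_ofList_of_nodup (ps : List (Int × Int)) (h : (ps.map Prod.fst).Nodup) :
    (PySem.Dict.ofList ps).items = ps := by
  have := PySem.Dict.items_foldl_insert_fresh ps Prod.fst Prod.snd PySem.Dict.empty
    (fun a _ => by simp [PySem.Dict.contains_empty]) h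
  simpa [PySem.Dict.ofList, PySem.Dict.update] using this

theorem pvSig_items (d : PySem.Dict Int (List Int)) (h : d.keys.Nodup) :
    (pvSig d).items = d.items.map (fun p => (p.1, (p.2.length : Int))) := by
  apply items_ofList_of_nodup
  simpa [List.map_map, Function.comp, PySem.Dict.keys] using h

theorem pvSig_get? (d : PySem.Dict Int (List Int)) (h : d.keys.Nodup) (k : Int) :
    (pvSig d).get? k = (d.get? k).map (fun v => (v.length : Int)) := by
  simp [PySem.Dict.get?, pvSig_items d h, List.find?_map, Function.comp_def, Option.map_map]

-- A's per-entry condition, in terms of get?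
theorem pvEntry_iff (b : PySem.Dict Int (List Int)) (p : Int × List Int) :
    (b.contains p.1 = true ∧ p.2.length = (b.getD p.1 []).length) ↔
      ∃ w, b.get? p.1 = some w ∧ p.2.length = w.length := by
  rw [PySem.Dict.contains_eq_isSome_get?, PySem.Dict.getD_eq_get?_getD]
  cases h : b.get? p.1 with
  | none => simp
  | some w => simp

-- the ∃-form of one directional pass
def pvFwd (a b : PySem.Dict Int (List Int)) : Prop :=
  ∀ p ∈ a.items, ∃ w, b.get? p.1 = some w ∧ p.2.length = w.length

theorem pvPassA_iff' (a b : PySem.Dict Int (List Int)) :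
    pvPassA b a.items = true ↔ pvFwd a b := by
  rw [pvPassA_iff]
  exact forall₂_congr (fun p _ => pvEntry_iff b p)

theorem pvFwd_keys_subset (a b : PySem.Dict Int (List Int)) (h : pvFwd a b) :
    a.keys ⊆ b.keys := by
  intro k hk
  obtain ⟨p, hp, rfl⟩ := List.mem_map.1 hk
  obtain ⟨w, hw, -⟩ := h p hp
  have hm := PySem.Dict.mem_items_of_get?_eq_some b hw
  exact PySem.Dict.mem_keys_of_mem_items (p := (p.1, w)) b hm

-- the heart: A's double pass ⇔ size equality plus one pass
theorem pvMain (d1 d2 : PySem.Dict Int (List Int)) (h1 : d1.keys.Nodup) (h2 : d2.keys.Nodup) :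
    (pvFwd d1 d2 ∧ pvFwd d2 d1) ↔ (d1.keys.length = d2.keys.length ∧ pvFwd d1 d2) := by
  constructor
  · rintro ⟨hF, hG⟩
    refine ⟨le_antisymm ?_ ?_, hF⟩
    · exact (List.subperm_of_subset h1 (pvFwd_keys_subset _ _ hF)).length_le
    · exact (List.subperm_of_subset h2 (pvFwd_keys_subset _ _ hG)).length_le
  · rintro ⟨hlen, hF⟩
    refine ⟨hF, ?_⟩
    have hperm : d1.keys.Perm d2.keys :=
      (List.subperm_of_subset h1 (pvFwd_keys_subset _ _ hF)).perm_of_length_le (le_of_eq hlen.symm)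
    intro p hp
    have hk : p.1 ∈ d1.keys := hperm.mem_iff.2 (PySem.Dict.mem_keys_of_mem_items d2 hp)
    obtain ⟨q, hq, hq1⟩ := List.mem_map.1 hk
    obtain ⟨w, hw, hlw⟩ := hF q hq
    rw [hq1] at hw
    have hp2 : d2.get? p.1 = some p.2 :=
      (PySem.Dict.get?_eq_some_iff_mem_items d2 p.1 p.2 h2).2 hp
    have hwp : w = p.2 := by rw [hp2] at hw; exact (Option.some_inj.1 hw).symm
    refine ⟨q.2, ?_, ?_⟩
    · rw [← hq1]
      exact (PySem.Dict.get?_eq_some_iff_mem_items d1 q.1 q.2 h1).2 hq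
    · rw [← hwp]; exact hlw.symm

-- ===== VERDICT (by name: the statement is the Claim_ definition above) =====
theorem is_balanced_count_iso_spec : Claim_equal_is_balanced_count_iso := by
  unfold Claim_equal_is_balanced_count_iso
  intro c1 c2 _
  unfold Spec_is_balanced_count_iso is_balanced_count_iso is_balanced_count_iso_alt
  set d1 := PySem.Dict.ofList c1 with hd1
  set d2 := PySem.Dict.ofList c2 with hd2
  have h1 : d1.keys.Nodup := PySem.Dict.nodup_keys_ofList c1
  have h2 : d2.keys.Nodup := PySem.Dict.nodup_keys_ofList c2
  rw [Bool.eq_iff_iff]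
  rw [Bool.and_eq_true, pvPassA_iff', pvPassA_iff']
  have hB : pvDictEq (pvSig d1) (pvSig d2) = true ↔
      (d1.keys.length = d2.keys.length ∧ pvFwd d1 d2) := by
    simp only [pvDictEq, Bool.and_eq_true, beq_iff_eq, List.all_eq_true,
      PySem.Dict.size, pvSig_items d1 h1, pvSig_items d2 h2, pvSig_get? d2 h2,
      List.length_map, List.mem_map]
    constructor
    · rintro ⟨hlen, hall⟩
      refine ⟨by simpa [PySem.Dict.keys] using hlen, ?_⟩
      intro p hp
      have := hall (p.1, (p.2.length : Int)) ⟨p, hp, rfl⟩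
      simp only [Option.map_eq_some_iff] at this
      obtain ⟨w, hw, hlw⟩ := this
      exact ⟨w, hw, by exact_mod_cast hlw.symm⟩
    · rintro ⟨hlen, hF⟩
      refine ⟨by simpa [PySem.Dict.keys] using hlen, ?_⟩
      rintro q ⟨p, hp, rfl⟩
      obtain ⟨w, hw, hlw⟩ := hF p hp
      simp [hw, hlw]
  rw [hB]
  exact pvMain d1 d2 h1 h2
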